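-- pv_equiv track=rewrite | github.com/hesonghuan17-netizen/Superconducting-Cross-Platform-Quantum-Noise-Model | Experiment/anlysis.py | reorganize_data
-- ===== SOURCE A (Python) =====
-- def reorganize_data(counts, num_qubits):
--     experiment_data = {}
--
--     # Calculating the step size
--     step_size = (num_qubits - 1) // 2 if num_qubits > 1 else 1
--
--     for binary_string, count in counts.items():
--         # Length of the binary string
--         length = len(binary_string)
--
--         # Initialize a list to collect qubits
--         qubits = []
--
--         # Collect qubits based on step size
--         for i in range(step_size):
--             qubit = binary_string[length - 1 - i::-step_size]
--             qubits.append(qubit)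
--         # Create a tuple of the collected qubits
--         experiment_tuple = tuple(qubits)
--
--         # Update the dictionary
--         if experiment_tuple in experiment_data:
--             experiment_data[experiment_tuple] += count
--         else:
--             experiment_data[experiment_tuple] = count
--
--     return experiment_data
-- ===== SOURCE B (Python) =====
-- def reorganize_data(counts, num_qubits):
--     experiment_data = {}
--
--     step_size = (num_qubits - 1) // 2 if num_qubits > 1 else 1
--
--     for binary_string, count in counts.items():
--         # Distribute the characters, last first, round-robin over the buckets.
--         buckets = [[] for _ in range(step_size)]
--         if buckets:
--             for j, ch in enumerate(reversed(binary_string)):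
--                 buckets[j % step_size].append(ch)
--         key = tuple(''.join(b) for b in buckets)
--         experiment_data[key] = experiment_data.get(key, 0) + count
--
--     return experiment_data
-- ===== Notes on version B (the rewrite author's own statement) =====
-- stated objective: alternative
-- what changed: Replaces A's step_size strided negative-step slices per key with a single round-robin pass distributing the reversed characters into step_size buckets, and folds A's two-branch dict update into one get-with-default update; Pre_ excludes counts containing a nonempty string shorter than step_size, where A's negative-start slice wraps around and duplicates characters, an accidental Python-slicing artefact no natural re-implementation reproduces (in real use the strings have length num_qubits, always at least step_size).
-- outside the precondition, e.g. on reorganize_data({'1': 1}, 10): A returns {('1', '1', '', ''): 1}, B returns {('1', '', '', ''): 1}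
import Mathlib
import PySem

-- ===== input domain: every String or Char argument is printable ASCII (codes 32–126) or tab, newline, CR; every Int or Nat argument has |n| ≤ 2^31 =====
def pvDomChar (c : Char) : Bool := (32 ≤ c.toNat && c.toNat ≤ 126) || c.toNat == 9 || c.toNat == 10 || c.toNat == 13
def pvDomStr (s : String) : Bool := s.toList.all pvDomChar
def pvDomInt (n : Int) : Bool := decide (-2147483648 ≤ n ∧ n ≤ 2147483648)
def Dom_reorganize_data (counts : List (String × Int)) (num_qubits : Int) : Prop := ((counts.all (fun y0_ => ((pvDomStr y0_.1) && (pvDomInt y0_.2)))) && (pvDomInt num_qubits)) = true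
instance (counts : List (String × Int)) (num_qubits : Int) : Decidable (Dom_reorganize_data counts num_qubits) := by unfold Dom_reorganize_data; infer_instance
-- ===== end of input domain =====

-- B distributes the reversed characters of each key round-robin into step_size buckets in
-- one pass instead of taking step_size negative-step slices (alternative decomposition);
-- Pre_ restricts to counts whose strings are empty or at least step_size long (the
-- function's natural domain), see the comment at Pre_reorganize_data.


-- ===== PORT A =====
def reorganize_data (counts : List (String × Int)) (num_qubits : Int) : List (List String × Int) :=
  -- step_size = (num_qubits - 1) // 2 if num_qubits > 1 else 1
  let step_size : Int := if num_qubits > 1 then PySem.Int.floordiv (num_qubits - 1) 2 else 1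
  let d : PySem.Dict (List String) Int := counts.foldl (fun d bc =>
    let length : Int := PySem.Str.len bc.1
    -- for i in range(step_size): qubits.append(binary_string[length-1-i::-step_size])
    -- (inside the loop step_size ≥ 1, so the slice step -step_size is nonzero and
    --  the slice never raises: getD "" is unreachable)
    let qubits : List String := (PySem.List.pyRange 0 step_size 1).foldl
      (fun qs i => qs ++ [(PySem.Str.slice? bc.1 (some (length - 1 - i)) none (-step_size)).getD ""]) []
    if d.contains qubits then d.insert qubits ((d.get? qubits).getD 0 + bc.2)
    else d.insert qubits bc.2) PySem.Dict.empty
  d.items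

-- ===== PORT B =====
-- the inner loop 'for j, ch in enumerate(reversed(binary_string)): buckets[j % step_size].append(ch)'
-- (the loop only runs when buckets is nonempty, so step_size > 0 and j % step_size ≥ 0: .toNat is exact)
def pvDistrib (n : Int) (bs : List (List Char)) (j : Int) : List Char → List (List Char)
  | [] => bs
  | c :: t => pvDistrib n (bs.modify (PySem.Int.mod j n).toNat (fun b => b ++ [c])) (j + 1) t

def reorganize_data_alt (counts : List (String × Int)) (num_qubits : Int) : List (List String × Int) :=
  let step_size : Int := if num_qubits > 1 then PySem.Int.floordiv (num_qubits - 1) 2 else 1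
  let d : PySem.Dict (List String) Int := counts.foldl (fun d bc =>
    let rev : List Char := bc.1.toList.reverse   -- reversed(binary_string)
    let buckets0 : List (List Char) := (PySem.List.pyRange 0 step_size 1).map (fun _ => [])
    let buckets := if buckets0 ≠ [] then pvDistrib step_size buckets0 0 rev else buckets0
    -- ''.join over a list of characters is String.ofList (exact)
    let key : List String := buckets.map (fun b => String.ofList b)
    d.insert key (d.getD key 0 + bc.2)) PySem.Dict.empty
  d.items

-- ===== PRECONDITION & SPEC =====
-- Pre_ excludes counts containing a nonempty string shorter than step_size (in the
-- function's use the strings are measurement bitstrings of length num_qubits, so always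
-- at least step_size long): there A still returns, but its negative-start slice wraps
-- around and duplicates the short string's characters into later key positions — an
-- accidental artefact of Python slicing no natural re-implementation reproduces.
def Pre_reorganize_data (counts : List (String × Int)) (num_qubits : Int) : Prop :=
  ∀ p ∈ counts, p.1.toList.length = 0 ∨
    (if num_qubits > 1 then PySem.Int.floordiv (num_qubits - 1) 2 else 1) ≤ (p.1.toList.length : Int)
instance (counts : List (String × Int)) (num_qubits : Int) : Decidable (Pre_reorganize_data counts num_qubits) := by unfold Pre_reorganize_data; infer_instance

def pvWitness_reorganize_data : (List (String × Int)) × Int := ([("10110", 3), ("01011", 1)], 5)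

def Spec_reorganize_data (counts : List (String × Int)) (num_qubits : Int) (out : List (List String × Int)) : Prop := out = reorganize_data_alt counts num_qubits
instance (counts : List (String × Int)) (num_qubits : Int) (out : List (List String × Int)) : Decidable (Spec_reorganize_data counts num_qubits out) := by unfold Spec_reorganize_data; infer_instance

-- ===== CLAIM (what is proved, stated in full; the proofs are below) =====
def Claim_equal_reorganize_data : Prop := ∀ (counts : List (String × Int)) (num_qubits : Int), Dom_reorganize_data counts num_qubits → Pre_reorganize_data counts num_qubits → Spec_reorganize_data counts num_qubits (reorganize_data counts num_qubits)

-- ===== LEMMAS AND PROOFS =====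

-- chars of the tail at absolute positions ≡ i (mod n), counting from absolute position j
def pvStrideFrom (n : Int) (i : Nat) : Int → List Char → List Char
  | _, [] => []
  | j, c :: t => (if (PySem.Int.mod j n).toNat = i then [c] else []) ++ pvStrideFrom n i (j + 1) t

theorem pvStrideFrom_append (n : Int) (i : Nat) (j : Int) (r : List Char) (c : Char) :
    pvStrideFrom n i j (r ++ [c])
      = pvStrideFrom n i j r ++ (if (PySem.Int.mod (j + r.length) n).toNat = i then [c] else []) := by
  induction r generalizing j with
  | nil => simp [pvStrideFrom]
  | cons c' t ih =>
      simp only [List.cons_append, pvStrideFrom, ih, List.length_cons]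
      rw [List.append_assoc]
      congr 2
      push_cast
      ring_nf

theorem pvDistrib_len (n : Int) (bs : List (List Char)) (j : Int) (t : List Char) :
    (pvDistrib n bs j t).length = bs.length := by
  induction t generalizing bs j with
  | nil => rfl
  | cons c t ih => simp [pvDistrib, ih]

theorem pvDistrib_getElem (n : Int) (t : List Char) (i : Nat) :
    ∀ (bs : List (List Char)) (j : Int) (hi : i < bs.length),
      (pvDistrib n bs j t)[i]? = some (bs[i] ++ pvStrideFrom n i j t) := by
  induction t with
  | nil => intro bs j hi; simp [pvDistrib, pvStrideFrom, List.getElem?_eq_getElem hi]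
  | cons c t ih =>
      intro bs j hi
      have hlen : i < (bs.modify (PySem.Int.mod j n).toNat (fun b => b ++ [c])).length := by
        simpa using hi
      rw [pvDistrib, ih _ _ hlen]
      rw [List.getElem_modify]
      by_cases h : (PySem.Int.mod j n).toNat = i
      · simp [pvStrideFrom, h]
      · simp [pvStrideFrom, h]

-- closed form of pvStrideFrom at start 0 (n > 0, i < n)
theorem pvCnt_eq (n i m : Nat) (hn : 0 < n) (hi : i < n) (h : m % n ≠ i) :
    (m + 1 - i + n - 1) / n = (m - i + n - 1) / n := by
  obtain ⟨q, r, hr, rfl⟩ : ∃ q r, r < n ∧ n * q + r = m :=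
    ⟨m / n, m % n, Nat.mod_lt _ hn, Nat.div_add_mod m n⟩
  rw [Nat.mul_add_mod, Nat.mod_eq_of_lt hr] at h
  rcases Nat.lt_or_ge r i with hlt | hge
  · rcases Nat.eq_zero_or_pos q with rfl | hq
    · rw [Nat.div_eq_of_lt (by omega), Nat.div_eq_of_lt (by omega)]
    · obtain ⟨q', rfl⟩ : ∃ q', q = q' + 1 := ⟨q - 1, by omega⟩
      have hm : n * (q' + 1) = n * q' + n := by ring
      have e1 : n * (q' + 1) + r + 1 - i + n - 1 = n * q' + (n * 1 + (n + r - i)) := by omega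
      have e2 : n * (q' + 1) + r - i + n - 1 = n * q' + (n * 1 + (n + r - i - 1)) := by omega
      rw [e1, e2, Nat.mul_add_div hn, Nat.mul_add_div hn, Nat.mul_add_div hn, Nat.mul_add_div hn,
        Nat.div_eq_of_lt (by omega : n + r - i < n), Nat.div_eq_of_lt (by omega : n + r - i - 1 < n)]
  · have hgt : i < r := by omega
    have e1 : n * q + r + 1 - i + n - 1 = n * q + (n * 1 + (r - i)) := by omega
    have e2 : n * q + r - i + n - 1 = n * q + (n * 1 + (r - i - 1)) := by omega
    rw [e1, e2, Nat.mul_add_div hn, Nat.mul_add_div hn, Nat.mul_add_div hn, Nat.mul_add_div hn,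
      Nat.div_eq_of_lt (by omega : r - i < n), Nat.div_eq_of_lt (by omega : r - i - 1 < n)]

theorem pvCnt_succ (n i m : Nat) (hn : 0 < n) (h : m % n = i) :
    (m - i + n - 1) / n = (m - i) / n ∧
    (m + 1 - i + n - 1) / n = (m - i) / n + 1 ∧
    i + n * ((m - i) / n) = m := by
  obtain ⟨q, r, hr, rfl⟩ : ∃ q r, r < n ∧ n * q + r = m :=
    ⟨m / n, m % n, Nat.mod_lt _ hn, Nat.div_add_mod m n⟩
  rw [Nat.mul_add_mod, Nat.mod_eq_of_lt hr] at h
  have e0 : n * q + r - i = n * q := by omega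
  have e1 : n * q + r - i + n - 1 = n * q + (n - 1) := by omega
  have e2 : n * q + r + 1 - i + n - 1 = n * q + (n * 1 + 0) := by omega
  rw [e1, e2, e0, Nat.mul_add_div hn, Nat.mul_add_div hn, Nat.mul_add_div hn,
    Nat.mul_div_cancel_left _ hn, Nat.div_eq_of_lt (by omega : n - 1 < n),
    Nat.div_eq_of_lt hn]
  omega

theorem pvStrideFrom_closed (n i : Nat) (hn : 0 < n) (hi : i < n) (r : List Char) :
    pvStrideFrom (n : Int) i 0 r
      = (List.range ((r.length - i + n - 1) / n)).filterMap (fun k => r[i + n * k]?) := by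
  induction r using List.reverseRecOn with
  | nil =>
      simp only [List.length_nil]
      rw [Nat.div_eq_of_lt (by omega)]
      simp [pvStrideFrom]
  | append_singleton r c ih =>
      rw [pvStrideFrom_append]
      have hmod : (PySem.Int.mod (0 + (r.length : Int)) (n : Int)).toNat = r.length % n := by
        rw [Int.zero_add, PySem.Int.mod_natCast]
        exact Int.toNat_natCast _
      rw [hmod, List.length_append, List.length_singleton]
      by_cases h : r.length % n = i
      · obtain ⟨hc1, hc2, hc3⟩ := pvCnt_succ n i r.length hn h
        rw [if_pos h, hc2, List.range_succ, List.filterMap_append, ih, hc1]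
        congr 1
        · apply List.filterMap_congr
          intro k hk
          rw [List.mem_range] at hk
          have hms : n * (k + 1) = n * k + n := by ring
          have hmul : n * (k + 1) ≤ n * ((r.length - i) / n) := Nat.mul_le_mul_left n hk
          have hle : i ≤ r.length := by rw [← h]; exact Nat.mod_le _ _
          have hik : i + n * k < r.length := by omega
          rw [List.getElem?_append_left hik]
        · simp only [List.filterMap_cons, List.filterMap_nil]
          rw [hc3, List.getElem?_append_right (le_refl _), Nat.sub_self]
          rfl
      · rw [if_neg h, List.append_nil, pvCnt_eq n i r.length hn hi h, ih]
        apply List.filterMap_congr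
        intro k hk
        rcases Nat.lt_or_ge (i + n * k) r.length with hlt | hge
        · rw [List.getElem?_append_left hlt]
        · have hne : i + n * k ≠ r.length := by
            intro he
            apply h
            rw [← he, Nat.add_mul_mod_self_left, Nat.mod_eq_of_lt hi]
          have h1 : r.length < i + n * k := lt_of_le_of_ne hge (Ne.symm hne)
          rw [List.getElem?_eq_none (by simpa using hge),
            List.getElem?_eq_none (by simp only [List.length_append, List.length_singleton]; omega)]

-- A's slice equals the bucket contents, for i < n ≤ length of the string
theorem pvSlice_eq_stride (s : List Char) (n i : Nat) (hn : 0 < n) (hi : i < n)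
    (hiL : i < s.length) :
    PySem.List.slice? s (some ((s.length : Int) - 1 - i)) none (-(n : Int))
      = some (pvStrideFrom (n : Int) i 0 s.reverse) := by
  rw [pvStrideFrom_closed n i hn hi, List.length_reverse]
  simp only [PySem.List.slice?, PySem.List.sliceIndices]
  rw [if_neg (show ¬(-(n:Int) = 0) by omega)]
  have hneg : -(n:Int) < 0 := by omega
  simp only [if_pos hneg]
  rw [if_neg (show ¬((s.length:Int) - 1 - i < 0) by omega)]
  rw [min_eq_left (show (s.length:Int) - 1 - i ≤ (s.length:Int) - 1 by omega)]
  rw [if_neg (show ¬(0 < -(n:Int)) by omega)]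
  rw [if_pos (show (-1:Int) < (s.length:Int) - 1 - i by omega)]
  simp only [neg_neg]
  have hcnt : ((s.length:Int) - 1 - ↑i - -1 + ↑n - 1) = ((s.length - i + n - 1 : Nat) : Int) := by
    omega
  rw [hcnt]
  have hdiv : (((s.length - i + n - 1 : Nat) : Int) / ((n : Nat) : Int)).toNat
      = (s.length - i + n - 1) / n := by
    rw [← Int.natCast_div]; exact Int.toNat_natCast _
  rw [hdiv]
  congr 1
  apply List.filterMap_congr
  intro k hk
  rw [List.mem_range] at hk
  have h1 : (k + 1) * n ≤ ((s.length - i + n - 1) / n) * n := Nat.mul_le_mul_right _ hk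
  have h2 := Nat.div_mul_le_self (s.length - i + n - 1) n
  have h3 : (k + 1) * n = k * n + n := by ring
  have h4 : n * k = k * n := Nat.mul_comm n k
  have hik : i + n * k < s.length := by omega
  rw [List.getElem?_reverse hik]
  have hc : ((n * k : Nat) : Int) = (n : Int) * (k : Int) := by push_cast; ring
  have he : ((s.length : Int) - 1 - ↑i + -↑n * ↑k) = ((s.length : Int) - 1 - ↑i - ((n * k : Nat) : Int)) := by
    rw [hc]; ring
  have hidx : ((s.length : Int) - 1 - ↑i - ((n * k : Nat) : Int)).toNat = s.length - 1 - (i + n * k) := by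
    omega
  rw [he, hidx]

-- Python's empty-string slice: any slice of "" with nonzero step is some []
theorem pvSlice_nil (a : Option Int) (st : Int) (h : st ≠ 0) :
    PySem.List.slice? ([] : List Char) a none st = some [] := by
  simp [PySem.List.slice?, h]

-- per-entry key equality when the string is empty or no shorter than the stride
theorem pvKey_eq (n : Int) (s : String)
    (hok : s.toList.length = 0 ∨ n ≤ (s.toList.length : Int)) :
    (PySem.List.pyRange 0 n 1).foldl
      (fun qs i => qs ++ [(PySem.Str.slice? s (some (PySem.Str.len s - 1 - i)) none (-n)).getD ""]) []
      = (let rev : List Char := s.toList.reverse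
         let buckets0 : List (List Char) := (PySem.List.pyRange 0 n 1).map (fun _ => [])
         let buckets := if buckets0 ≠ [] then pvDistrib n buckets0 0 rev else buckets0
         buckets.map (fun b => String.ofList b)) := by
  dsimp only
  by_cases hn : 0 < n
  case neg =>
    have h0 : n ≤ 0 := by omega
    rw [PySem.List.pyRange_one_eq_nil h0]
    simp
  case pos =>
  obtain ⟨N, rfl⟩ : ∃ N : Nat, n = (N : Int) :=
    ⟨n.toNat, (Int.toNat_of_nonneg (le_of_lt hn)).symm⟩
  have hN : 0 < N := by exact_mod_cast hn
  have hrangeN : PySem.List.pyRange 0 (N : Int) 1 = List.map (fun (k : Nat) => (k : Int)) (List.range N) := by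
    rw [PySem.List.pyRange_one]
    have h1 : ((N : Int) - 0).toNat = N := by omega
    rw [h1]
    exact List.map_congr_left (fun k _ => by omega)
  rw [hrangeN]
  rw [PySem.List.foldl_append_singleton_eq_map
    (fun i => (PySem.Str.slice? s (some (PySem.Str.len s - 1 - i)) none (-(N : Int))).getD "")]
  have hb0 : ((List.map (fun (k : Nat) => (k : Int)) (List.range N)).map
      (fun _ => ([] : List Char))) ≠ [] := by
    simp only [ne_eq, List.map_eq_nil_iff, List.map_eq_nil_iff, List.range_eq_nil]
    omega
  rw [if_pos hb0]
  have hb0len : ((List.map (fun (k : Nat) => (k : Int)) (List.range N)).map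
      (fun _ => ([] : List Char))).length = N := by simp
  apply List.ext_getElem?
  intro i
  have hplen : ((pvDistrib (N : Int)
      ((List.map (fun (k : Nat) => (k : Int)) (List.range N)).map
        (fun _ => ([] : List Char))) 0 s.toList.reverse).map (fun b => String.ofList b)).length
      = N := by
    rw [List.length_map, pvDistrib_len, hb0len]
  rcases Nat.lt_or_ge i N with hi | hi
  · simp only [List.nil_append, List.getElem?_map]
    rw [List.getElem?_range hi]
    simp only [Option.map_some]
    rw [pvDistrib_getElem _ _ _ _ _ (by rw [hb0len]; exact hi)]
    simp only [List.getElem_map, List.nil_append, Option.map_some]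
    congr 1
    rw [PySem.Str.slice?]
    simp only [PySem.Chars.slice?_eq_listSlice?, PySem.Str.len_eq]
    rcases hok with hL0 | hLN
    · obtain hnil : s.toList = [] := List.length_eq_zero_iff.mp hL0
      rw [hnil]
      rw [pvSlice_nil _ _ (by omega)]
      simp [pvStrideFrom]
    · have hLN' : N ≤ s.toList.length := by exact_mod_cast hLN
      rw [pvSlice_eq_stride s.toList N i hN hi (by omega)]
      rfl
  · rw [List.getElem?_eq_none (by simpa using hi),
      List.getElem?_eq_none (by rw [hplen]; omega)]

-- the two dict updates agree
theorem pvDictStep (d : PySem.Dict (List String) Int) (k : List String) (c : Int) :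
    (if d.contains k then d.insert k ((d.get? k).getD 0 + c) else d.insert k c)
      = d.insert k (d.getD k 0 + c) := by
  by_cases h : d.contains k
  · simp [h, PySem.Dict.getD_eq_get?_getD]
  · have h' : d.contains k = false := by simpa using h
    have h0 : d.getD k 0 = 0 := PySem.Dict.getD_of_not_contains d (0 : Int) h'
    simp [h, h0]

-- ===== VERDICT (by name: the statements are the Claim_ definitions above) =====
theorem reorganize_data_spec : Claim_equal_reorganize_data := by
  intro counts num_qubits _ hpre
  unfold Spec_reorganize_data reorganize_data reorganize_data_alt
  dsimp only
  apply congrArg PySem.Dict.items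
  apply PySem.List.foldl_congr_mem
  intro d bc hmem
  rw [pvKey_eq _ _ (hpre bc hmem)]
  dsimp only
  rw [pvDictStep]
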